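-- pv_equiv track=rewrite | github.com/Dhruv-dx/ISF-Pricing-Workflow | inshape_pricing_formatter.py | detect_availability_columns
-- ===== SOURCE A (Python) =====
-- from typing import Dict, List, Set
--
-- def detect_availability_columns(headers: List[str]) -> Dict[str, int]:
--     """Detect which availability/program columns exist in the CSV header.
--     Only matches exact program names to avoid false positives."""
--     detected_programs = {}
--
--     # Map of program names to their exact header patterns
--     # These must match exactly or be the main part of the column name
--     program_exact_matches = {
--         "SILVER SNEAKERS": ["silver sneakers"],
--         "ASH - Standard": ["ash - standard", "ash standard"],
--         "ASH - Premium": ["ash - premium", "ash premium"],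
--         "Optum - Classic Core": ["optum - classic core", "optum classic core"],
--         "Optum - Premium Elite": ["optum - premium elite", "optum premium elite"],
--         "OPTUM RENEW": ["optum renew", "optum renew - nfc"],
--         "Peer Fit": ["peer fit", "peerfit"]
--     }
--
--     # Check each header column for exact program name matches
--     for idx, header in enumerate(headers):
--         header_clean = header.strip()
--         header_lower = header_clean.lower()
--
--         for program_name, exact_patterns in program_exact_matches.items():
--             # Skip if already detected
--             if program_name in detected_programs:
--                 continue
--
--             # Check for exact matches - the header must contain the full program name
--             for pattern in exact_patterns:
--                 pattern_lower = pattern.lower()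
--                 # Must be exact match or the header must start/end with the pattern
--                 # This prevents matching "Total Soccer Academy Silver" with "SILVER SNEAKERS"
--                 if (pattern_lower == header_lower or
--                     header_lower == pattern_lower or
--                     header_lower.startswith(pattern_lower + " -") or
--                     header_lower.startswith(pattern_lower + " ") or
--                     header_lower.endswith(" - " + pattern_lower) or
--                     header_lower.endswith(" " + pattern_lower)):
--                     # Additional check: make sure it's not a false match
--                     # For "silver sneakers", reject if header contains "soccer" or "academy"
--                     if "silver sneakers" in pattern_lower:
--                         if "soccer" in header_lower or "academy" in header_lower:
--                             continue
--                     detected_programs[program_name] = idx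
--                     break
--
--     return detected_programs
-- ===== SOURCE B (Python) =====
-- def detect_availability_columns(headers):
--     """Detect which availability/program columns exist in the CSV header.
--     Resolves each program independently: find the first matching header index
--     per program, then order the results by column index (stable on ties)."""
--     program_exact_matches = {
--         "SILVER SNEAKERS": ["silver sneakers"],
--         "ASH - Standard": ["ash - standard", "ash standard"],
--         "ASH - Premium": ["ash - premium", "ash premium"],
--         "Optum - Classic Core": ["optum - classic core", "optum classic core"],
--         "Optum - Premium Elite": ["optum - premium elite", "optum premium elite"],
--         "OPTUM RENEW": ["optum renew", "optum renew - nfc"],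
--         "Peer Fit": ["peer fit", "peerfit"],
--     }
--
--     def matches(header_lower, pattern):
--         if "silver sneakers" in pattern and (
--                 "soccer" in header_lower or "academy" in header_lower):
--             return False
--         return (header_lower == pattern
--                 or header_lower.startswith(pattern + " -")
--                 or header_lower.startswith(pattern + " ")
--                 or header_lower.endswith(" - " + pattern)
--                 or header_lower.endswith(" " + pattern))
--
--     cleaned = [h.strip().lower() for h in headers]
--     found = []
--     for program, patterns in program_exact_matches.items():
--         idx = next((i for i, h in enumerate(cleaned)
--                     if any(matches(h, p) for p in patterns)), None)
--         if idx is not None: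
--             found.append((program, idx))
--     found.sort(key=lambda item: item[1])  # stable: ties keep table order
--     return dict(found)
-- ===== Notes on version B (the rewrite author's own statement) =====
-- stated objective: alternative
-- what changed: A scans headers in the outer loop carrying an 'already detected' skip state across a nested program loop; B resolves each program independently by finding its first matching header index in one scan and then orders the detected programs by column index with a single stable sort.
import Mathlib
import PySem

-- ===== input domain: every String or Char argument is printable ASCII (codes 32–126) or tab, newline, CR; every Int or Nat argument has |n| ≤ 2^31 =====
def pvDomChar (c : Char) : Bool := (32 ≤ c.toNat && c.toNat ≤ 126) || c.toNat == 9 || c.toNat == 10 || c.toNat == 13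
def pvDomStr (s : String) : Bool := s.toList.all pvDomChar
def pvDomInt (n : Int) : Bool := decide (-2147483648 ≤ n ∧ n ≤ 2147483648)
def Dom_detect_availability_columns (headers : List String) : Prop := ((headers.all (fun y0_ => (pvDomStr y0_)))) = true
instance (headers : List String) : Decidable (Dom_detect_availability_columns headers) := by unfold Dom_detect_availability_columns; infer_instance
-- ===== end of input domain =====

-- B resolves each program independently (first matching header index per program) and then
-- orders the results by column index with one stable sort, instead of A's header-major scan
-- that carries an 'already detected' skip state; objective: alternative decomposition.

-- The program → exact-pattern table (shared literal data of both ports).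
def pvProgramTable : List (String × List String) :=
  [("SILVER SNEAKERS", ["silver sneakers"]),
   ("ASH - Standard", ["ash - standard", "ash standard"]),
   ("ASH - Premium", ["ash - premium", "ash premium"]),
   ("Optum - Classic Core", ["optum - classic core", "optum classic core"]),
   ("Optum - Premium Elite", ["optum - premium elite", "optum premium elite"]),
   ("OPTUM RENEW", ["optum renew", "optum renew - nfc"]),
   ("Peer Fit", ["peer fit", "peerfit"])]

-- ===== PORT A =====
-- the six-way match condition of A (string concatenation is List.append on toList)
def pvGeoA (pl hl : List Char) : Bool :=
  pl == hl || hl == pl ||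
  PySem.Chars.startswith hl (pl ++ " -".toList) ||
  PySem.Chars.startswith hl (pl ++ " ".toList) ||
  PySem.Chars.endswith hl (" - ".toList ++ pl) ||
  PySem.Chars.endswith hl (" ".toList ++ pl)

-- A's inner 'for pattern in exact_patterns' loop with its continue/break
def pvPatternLoopA (hl : List Char) : List String → Bool
  | [] => false
  | pat :: rest =>
    let pl := PySem.Chars.lower pat.toList
    if pvGeoA pl hl then
      if PySem.Chars.isIn "silver sneakers".toList pl then
        if PySem.Chars.isIn "soccer".toList hl || PySem.Chars.isIn "academy".toList hl then
          pvPatternLoopA hl rest          -- continue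
        else true                          -- detected, break
      else true                            -- detected, break
    else pvPatternLoopA hl rest

def detect_availability_columns (headers : List String) : List (String × Int) :=
  ((PySem.List.enumerate headers).foldl (fun d p =>
      let header_lower := PySem.Chars.lower (PySem.Chars.strip p.2.toList)
      pvProgramTable.foldl (fun d pr =>
        if d.contains pr.1 then d
        else if pvPatternLoopA header_lower pr.2 then d.insert pr.1 p.1 else d) d)
    PySem.Dict.empty).items

-- ===== PORT B =====
-- B's matches(header_lower, pattern) predicate
def pvMatchesB (hl pat : List Char) : Bool :=
  if PySem.Chars.isIn "silver sneakers".toList pat &&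
     (PySem.Chars.isIn "soccer".toList hl || PySem.Chars.isIn "academy".toList hl) then false
  else
    hl == pat ||
    PySem.Chars.startswith hl (pat ++ " -".toList) ||
    PySem.Chars.startswith hl (pat ++ " ".toList) ||
    PySem.Chars.endswith hl (" - ".toList ++ pat) ||
    PySem.Chars.endswith hl (" ".toList ++ pat)

-- next((i for i, h in enumerate(cleaned) if any(matches(h, p) for p in patterns)), None)
def pvFirstIdxB (pats : List String) : Int → List (List Char) → Option Int
  | _, [] => none
  | i, h :: t =>
    if pats.any (fun p => pvMatchesB h p.toList) then some i else pvFirstIdxB pats (i + 1) t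

def detect_availability_columns_alt (headers : List String) : List (String × Int) :=
  let cleaned := headers.map (fun h => PySem.Chars.lower (PySem.Chars.strip h.toList))
  let found := pvProgramTable.filterMap (fun pr =>
      (pvFirstIdxB pr.2 0 cleaned).map (fun i => (pr.1, i)))
  (PySem.Dict.ofList (PySem.List.sorted found (fun it => it.2))).items

-- ===== PRECONDITION & SPEC =====
def Spec_detect_availability_columns (headers : List String) (out : List (String × Int)) : Prop := out = detect_availability_columns_alt headers
instance (headers : List String) (out : List (String × Int)) : Decidable (Spec_detect_availability_columns headers out) := by unfold Spec_detect_availability_columns; infer_instance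

-- ===== CLAIM (what is proved, stated in full; the proofs are below) =====
def Claim_equal_detect_availability_columns : Prop := ∀ (headers : List String), Dom_detect_availability_columns headers → Spec_detect_availability_columns headers (detect_availability_columns headers)

-- ===== LEMMAS AND PROOFS =====

-- the per-program match predicate both sides agree on
def pvQ (h : List Char) (pr : String × List String) : Bool :=
  pr.2.any (fun p => pvMatchesB h p.toList)

-- A's outer loop, abstracted: process cleaned headers from index i with dict state d
def pvAouter : Int → PySem.Dict String Int → List (List Char) → PySem.Dict String Int
  | _, d, [] => d
  | i, d, h :: t =>
    pvAouter (i + 1)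
      (pvProgramTable.foldl (fun d pr =>
        if d.contains pr.1 then d
        else if pvPatternLoopA h pr.2 then d.insert pr.1 i else d) d) t

-- the list both loops build: per header, the still-unresolved matching programs in table order
def pvBuild (i : Int) (rem : List (String × List String)) : List (List Char) → List (String × Int)
  | [] => []
  | h :: t =>
    (rem.filter (fun pr => pvQ h pr)).map (fun pr => (pr.1, i)) ++
    pvBuild (i + 1) (rem.filter (fun pr => !pvQ h pr)) t

theorem pvPatternLoopA_eq (hl : List Char) (pats : List String)
    (hp : ∀ p ∈ pats, PySem.Chars.lower p.toList = p.toList) :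
    pvPatternLoopA hl pats = pats.any (fun p => pvMatchesB hl p.toList) := by
  induction pats with
  | nil => simp [pvPatternLoopA]
  | cons pat rest ih =>
    rw [List.any_cons, pvPatternLoopA, hp pat (List.mem_cons_self ..),
        ih (fun p hm => hp p (List.mem_cons_of_mem _ hm))]
    have hgeo : pvGeoA pat.toList hl
        = (hl == pat.toList ||
           PySem.Chars.startswith hl (pat.toList ++ " -".toList) ||
           PySem.Chars.startswith hl (pat.toList ++ " ".toList) ||
           PySem.Chars.endswith hl (" - ".toList ++ pat.toList) ||
           PySem.Chars.endswith hl (" ".toList ++ pat.toList)) := by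
      have hsym : (pat.toList == hl) = (hl == pat.toList) := by
        by_cases h : pat.toList = hl
        · subst h; rfl
        · have h2 : hl ≠ pat.toList := fun e => h e.symm
          simp [h, h2]
      simp [pvGeoA, hsym]
    rw [hgeo]
    simp only [pvMatchesB]
    cases hss : PySem.Chars.isIn "silver sneakers".toList pat.toList <;>
    cases hsoc : (PySem.Chars.isIn "soccer".toList hl || PySem.Chars.isIn "academy".toList hl) <;>
    cases hg : (hl == pat.toList ||
           PySem.Chars.startswith hl (pat.toList ++ " -".toList) ||
           PySem.Chars.startswith hl (pat.toList ++ " ".toList) ||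
           PySem.Chars.endswith hl (" - ".toList ++ pat.toList) ||
           PySem.Chars.endswith hl (" ".toList ++ pat.toList)) <;>
    simp_all

theorem pvTable_lower : ∀ pr ∈ pvProgramTable, ∀ p ∈ pr.2,
    PySem.Chars.lower p.toList = p.toList := by decide

theorem pvTable_keys_nodup : (pvProgramTable.map (·.1)).Nodup := by decide

-- inner fold: items
theorem pvInner_items (f : String × List String → Bool) (i : Int)
    (L : List (String × List String)) (hnd : (L.map (·.1)).Nodup)
    (d : PySem.Dict String Int) :
    (L.foldl (fun d pr =>
        if d.contains pr.1 then d
        else if f pr then d.insert pr.1 i else d) d).items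
      = d.items ++ (L.filter (fun pr => !d.contains pr.1 && f pr)).map (fun pr => (pr.1, i)) := by
  induction L generalizing d with
  | nil => simp
  | cons pr rest ih =>
    simp only [List.map_cons, List.nodup_cons, List.mem_map] at hnd
    obtain ⟨hpr, hnd⟩ := hnd
    simp only [List.foldl_cons, List.filter_cons]
    by_cases hc : d.contains pr.1 = true
    · rw [if_pos hc]
      simp [hc, ih hnd d]
    · simp only [Bool.not_eq_true] at hc
      rw [if_neg (by simp [hc])]
      simp only [hc, Bool.not_false, Bool.true_and]
      by_cases hf : f pr = true
      · rw [if_pos hf, if_pos hf, List.map_cons]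
        rw [ih hnd (d.insert pr.1 i),
            PySem.Dict.items_insert_of_not_contains d i hc,
            List.filter_congr (l := rest)
              (q := fun pr' => !d.contains pr'.1 && f pr')
              (fun pr' hm => by
                rw [PySem.Dict.contains_insert]
                have : (pr'.1 == pr.1) = false := by
                  simp only [beq_eq_false_iff_ne, ne_eq]
                  exact fun e => hpr ⟨pr', hm, e⟩
                simp [this])]
        simp
      · rw [if_neg hf, if_neg (by simpa using hf)]
        exact ih hnd d

theorem pvAnyCongrMem {l : List (String × List String)} {p q : String × List String → Bool}
    (h : ∀ a ∈ l, p a = q a) : l.any p = l.any q := by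
  induction l with
  | nil => rfl
  | cons a t ih =>
    simp only [List.any_cons, h a (List.mem_cons_self ..),
      ih (fun x hx => h x (List.mem_cons_of_mem _ hx))]

-- inner fold: contains
theorem pvInner_contains (f : String × List String → Bool) (i : Int)
    (L : List (String × List String)) (hnd : (L.map (·.1)).Nodup)
    (d : PySem.Dict String Int) (k : String) :
    (L.foldl (fun d pr =>
        if d.contains pr.1 then d
        else if f pr then d.insert pr.1 i else d) d).contains k
      = (d.contains k || L.any (fun pr => pr.1 == k && (!d.contains pr.1 && f pr))) := by
  induction L generalizing d with
  | nil => simp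
  | cons pr rest ih =>
    simp only [List.map_cons, List.nodup_cons, List.mem_map] at hnd
    obtain ⟨hpr, hnd⟩ := hnd
    simp only [List.foldl_cons, List.any_cons]
    by_cases hc : d.contains pr.1 = true
    · rw [if_pos hc]
      rw [ih hnd d]; simp [hc]
    · simp only [Bool.not_eq_true] at hc
      rw [if_neg (by simp [hc])]
      simp only [hc, Bool.not_false, Bool.true_and]
      by_cases hf : f pr = true
      · rw [if_pos hf]
        simp only [hf, Bool.and_true]
        rw [ih hnd (d.insert pr.1 i)]
        rw [PySem.Dict.contains_insert]
        rw [pvAnyCongrMem (l := rest)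
              (q := fun pr' => pr'.1 == k && (!d.contains pr'.1 && f pr'))
              (fun pr' hm => by
                rw [PySem.Dict.contains_insert]
                have : (pr'.1 == pr.1) = false := by
                  simp only [beq_eq_false_iff_ne, ne_eq]
                  exact fun e => hpr ⟨pr', hm, e⟩
                simp [this])]
        by_cases hk : k = pr.1
        · subst hk
          simp [Bool.or_comm]
        · have h1 : (k == pr.1) = false := by simp [hk]
          have h2 : (pr.1 == k) = false := by
            rw [beq_eq_false_iff_ne]
            exact fun e => hk e.symm
          simp [h1, h2]
      · rw [if_neg hf]
        simp only [Bool.not_eq_true] at hf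
        simp only [hf, Bool.and_false, Bool.false_or]
        exact ih hnd d

theorem pvAnyKey (L : List (String × List String)) (hnd : (L.map (·.1)).Nodup)
    (pr : String × List String) (hm : pr ∈ L) (g : String × List String → Bool) :
    L.any (fun pr' => pr'.1 == pr.1 && g pr') = g pr := by
  induction L with
  | nil => cases hm
  | cons a t ih =>
    simp only [List.map_cons, List.nodup_cons, List.mem_map] at hnd
    obtain ⟨ha, hnd⟩ := hnd
    rcases List.mem_cons.mp hm with he | hm'
    · subst he
      simp only [List.any_cons, beq_self_eq_true, Bool.true_and]
      have : t.any (fun pr' => pr'.1 == pr.1 && g pr') = false := by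
        rw [List.any_eq_false]
        intro x hx
        have : (x.1 == pr.1) = false := by
          rw [beq_eq_false_iff_ne]
          exact fun e => ha ⟨x, hx, e⟩
        simp [this]
      rw [this]
      cases g pr <;> simp
    · simp only [List.any_cons]
      have : (a.1 == pr.1) = false := by
        rw [beq_eq_false_iff_ne]
        exact fun e => ha ⟨pr, hm', e.symm⟩
      simp only [this, Bool.false_and, Bool.false_or]
      exact ih hnd hm'

theorem pvAouter_items (hs : List (List Char)) : ∀ (i : Int) (d : PySem.Dict String Int),
    (pvAouter i d hs).items
      = d.items ++ pvBuild i (pvProgramTable.filter (fun pr => !d.contains pr.1)) hs := by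
  induction hs with
  | nil => simp [pvAouter, pvBuild]
  | cons h t ih =>
    intro i d
    have hq : ∀ pr ∈ pvProgramTable, pvPatternLoopA h pr.2 = pvQ h pr := by
      intro pr hm
      exact pvPatternLoopA_eq h pr.2 (pvTable_lower pr hm)
    simp only [pvAouter, pvBuild]
    rw [ih]
    rw [pvInner_items (fun pr => pvPatternLoopA h pr.2) i pvProgramTable pvTable_keys_nodup d]
    have hcont : pvProgramTable.filter
        (fun pr => !(pvProgramTable.foldl (fun d pr =>
            if d.contains pr.1 then d
            else if pvPatternLoopA h pr.2 then d.insert pr.1 i else d) d).contains pr.1)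
        = (pvProgramTable.filter (fun pr => !d.contains pr.1)).filter (fun pr => !pvQ h pr) := by
      rw [List.filter_filter]
      apply List.filter_congr
      intro pr hm
      rw [pvInner_contains (fun pr => pvPatternLoopA h pr.2) i pvProgramTable pvTable_keys_nodup d pr.1]
      rw [pvAnyKey pvProgramTable pvTable_keys_nodup pr hm]
      rw [hq pr hm]
      cases hcd : d.contains pr.1 <;> cases hqq : pvQ h pr <;> simp
    rw [hcont]
    have hchunk : pvProgramTable.filter (fun pr => !d.contains pr.1 && pvPatternLoopA h pr.2)
        = (pvProgramTable.filter (fun pr => !d.contains pr.1)).filter (fun pr => pvQ h pr) := by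
      rw [List.filter_filter]
      apply List.filter_congr
      intro pr hm
      rw [hq pr hm, Bool.and_comm]
    rw [hchunk, List.append_assoc]

-- lower bound of pvFirstIdxB
theorem pvFirstIdxB_ge (pats : List String) (hs : List (List Char)) : ∀ (i j : Int),
    pvFirstIdxB pats i hs = some j → i ≤ j := by
  induction hs with
  | nil => intro i j h; simp [pvFirstIdxB] at h
  | cons h t ih =>
    intro i j hh
    simp only [pvFirstIdxB] at hh
    split at hh
    · simp only [Option.some.injEq] at hh; omega
    · have := ih (i + 1) j hh; omega

theorem pvInsertBy_append (before : (String × Int) → (String × Int) → Bool) (x : String × Int)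
    (P S : List (String × Int)) (hP : ∀ p ∈ P, before x p = false) :
    PySem.List.insertBy before x (P ++ S) = P ++ PySem.List.insertBy before x S := by
  induction P with
  | nil => rfl
  | cons a t ih =>
    have ha := hP a (List.mem_cons_self ..)
    simp only [List.cons_append, PySem.List.insertBy, ha, Bool.false_eq_true, if_false]
    rw [ih (fun p hp => hP p (List.mem_cons_of_mem _ hp))]

theorem pvSortedSnoc (l : List (String × Int)) (x : String × Int) :
    PySem.List.sorted (l ++ [x]) (fun it => it.2)
      = PySem.List.insertBy (fun a b => decide (a.2 < b.2)) x
          (PySem.List.sorted l (fun it => it.2)) := by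
  rw [PySem.List.sorted_eq_foldl_insertBy, PySem.List.sorted_eq_foldl_insertBy,
      List.foldl_append]
  rfl

-- stable sort pulls the minimal key i to the front, in order
theorem pvSorted_min_front (xs : List (String × Int)) (i : Int)
    (h : ∀ x ∈ xs, i ≤ x.2) :
    PySem.List.sorted xs (fun it => it.2)
      = xs.filter (fun x => x.2 == i) ++
        PySem.List.sorted (xs.filter (fun x => x.2 != i)) (fun it => it.2) := by
  induction xs using List.reverseRecOn with
  | nil => simp [PySem.List.sorted_eq_foldl_insertBy]
  | append_singleton xs x ih =>
    have hx : i ≤ x.2 := h x (by simp)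
    have hxs : ∀ y ∈ xs, i ≤ y.2 := fun y hy => h y (by simp [hy])
    rw [pvSortedSnoc, ih hxs, List.filter_append, List.filter_append]
    have hPi : ∀ p ∈ xs.filter (fun x => x.2 == i), p.2 = i := by
      intro p hp
      have := (List.mem_filter.mp hp).2
      exact beq_iff_eq.mp this
    have hSgt : ∀ s ∈ PySem.List.sorted (xs.filter (fun x => x.2 != i)) (fun it => it.2), i < s.2 := by
      intro s hs
      have hs' := (PySem.List.mem_sorted _ _ _ _).mp hs
      have h1 := (List.mem_filter.mp hs').1
      have h2 := (List.mem_filter.mp hs').2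
      have : s.2 ≠ i := by simpa using h2
      exact lt_of_le_of_ne (hxs s h1) (Ne.symm this)
    by_cases hxi : x.2 = i
    · rw [pvInsertBy_append _ _ _ _ (fun p hp => by
        have := hPi p hp
        simp [hxi, this])]
      have hfe : List.filter (fun x => x.2 == i) [x] = [x] := by simp [hxi]
      have hfn : List.filter (fun x => x.2 != i) [x] = [] := by simp [hxi]
      rw [hfe, hfn, List.append_nil]
      have hins : PySem.List.insertBy (fun a b => decide (a.2 < b.2)) x
          (PySem.List.sorted (xs.filter (fun x => x.2 != i)) (fun it => it.2))
          = x :: PySem.List.sorted (xs.filter (fun x => x.2 != i)) (fun it => it.2) := by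
        cases hS : PySem.List.sorted (xs.filter (fun x => x.2 != i)) (fun it => it.2) with
        | nil => rfl
        | cons s t =>
          have : i < s.2 := hSgt s (by rw [hS]; exact List.mem_cons_self ..)
          simp only [PySem.List.insertBy]
          rw [if_pos (by simp [hxi]; omega)]
      rw [hins]
      simp
    · have hlt : i < x.2 := lt_of_le_of_ne hx (fun e => hxi e.symm)
      rw [pvInsertBy_append _ _ _ _ (fun p hp => by
        have := hPi p hp
        simp [this]; omega)]
      have hfe : List.filter (fun x => x.2 == i) [x] = [] := by
        simp [hxi]
      have hfn : List.filter (fun x => x.2 != i) [x] = [x] := by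
        simp [hxi]
      rw [hfe, hfn, List.append_nil, ← pvSortedSnoc]

theorem pvSplit (h : List Char) (t : List (List Char)) (i : Int) :
    ∀ rem : List (String × List String),
      ((rem.filterMap (fun pr => (pvFirstIdxB pr.2 i (h :: t)).map (fun j => (pr.1, j)))).filter
          (fun x => x.2 == i)
        = (rem.filter (fun pr => pvQ h pr)).map (fun pr => (pr.1, i)))
      ∧ ((rem.filterMap (fun pr => (pvFirstIdxB pr.2 i (h :: t)).map (fun j => (pr.1, j)))).filter
          (fun x => x.2 != i)
        = (rem.filter (fun pr => !pvQ h pr)).filterMap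
            (fun pr => (pvFirstIdxB pr.2 (i + 1) t).map (fun j => (pr.1, j)))) := by
  have hunf : ∀ pr : String × List String,
      (pvFirstIdxB pr.2 i (h :: t)).map (fun j => (pr.1, j))
        = if pvQ h pr then some (pr.1, i)
          else (pvFirstIdxB pr.2 (i + 1) t).map (fun j => (pr.1, j)) := by
    intro pr
    simp only [pvFirstIdxB, pvQ]
    split <;> simp
  intro rem
  induction rem with
  | nil => exact ⟨rfl, rfl⟩
  | cons pr rest ihr =>
    by_cases hq : pvQ h pr = true
    · rw [List.filterMap_cons_some (by rw [hunf pr, if_pos hq])]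
      constructor
      · simp only [List.filter_cons]
        rw [if_pos (by simp), if_pos hq, List.map_cons, ihr.1]
      · simp only [List.filter_cons]
        rw [if_neg (by simp), if_neg (by simp [hq]), ihr.2]
    · cases hfi : pvFirstIdxB pr.2 (i + 1) t with
      | none =>
        rw [List.filterMap_cons_none (by rw [hunf pr, if_neg hq, hfi]; rfl)]
        constructor
        · simp only [List.filter_cons]
          rw [if_neg (by simp [hq]), ihr.1]
        · simp only [List.filter_cons]
          rw [if_pos (by simp [hq]),
              List.filterMap_cons_none (by rw [hfi]; rfl), ihr.2]
      | some j =>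
        have hj := pvFirstIdxB_ge pr.2 t (i + 1) j hfi
        rw [List.filterMap_cons_some (by rw [hunf pr, if_neg hq, hfi]; rfl)]
        constructor
        · simp only [List.filter_cons]
          rw [if_neg (by simp; omega), if_neg (by simp [hq]), ihr.1]
        · simp only [List.filter_cons]
          rw [if_pos (by simp; omega), if_pos (by simp [hq]),
              List.filterMap_cons_some (by rw [hfi]; rfl), ihr.2]

theorem pvBuild_sorted (hs : List (List Char)) : ∀ (i : Int) (rem : List (String × List String)),
    pvBuild i rem hs
      = PySem.List.sorted
          (rem.filterMap (fun pr => (pvFirstIdxB pr.2 i hs).map (fun j => (pr.1, j))))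
          (fun it => it.2) := by
  induction hs with
  | nil =>
    intro i rem
    have : rem.filterMap (fun pr => (pvFirstIdxB pr.2 i []).map (fun j => (pr.1, j))) = [] := by
      simp [pvFirstIdxB]
    rw [this]
    simp [pvBuild, PySem.List.sorted_eq_foldl_insertBy]
  | cons h t ih =>
    intro i rem
    have hge : ∀ x ∈ rem.filterMap (fun pr => (pvFirstIdxB pr.2 i (h :: t)).map (fun j => (pr.1, j))), i ≤ x.2 := by
      intro x hx
      obtain ⟨pr, hpr, hFx⟩ := List.mem_filterMap.mp hx
      obtain ⟨j, hj, he⟩ := Option.map_eq_some_iff.mp hFx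
      have := pvFirstIdxB_ge pr.2 (h :: t) i j hj
      subst he; simpa
    rw [pvSorted_min_front _ i hge, (pvSplit h t i rem).1, (pvSplit h t i rem).2,
        ← ih (i + 1) (rem.filter (fun pr => !pvQ h pr))]
    rfl

theorem pvDetect_enum (hs : List String) : ∀ (i : Int) (d : PySem.Dict String Int),
    (PySem.List.enumerate hs i).foldl (fun d p =>
        let header_lower := PySem.Chars.lower (PySem.Chars.strip p.2.toList)
        pvProgramTable.foldl (fun d pr =>
          if d.contains pr.1 then d
          else if pvPatternLoopA header_lower pr.2 then d.insert pr.1 p.1 else d) d) d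
      = pvAouter i d (hs.map (fun h => PySem.Chars.lower (PySem.Chars.strip h.toList))) := by
  induction hs with
  | nil => intro i d; rfl
  | cons h t ih =>
    intro i d
    rw [PySem.List.enumerate_cons]
    simp only [List.foldl_cons, List.map_cons, pvAouter]
    exact ih (i + 1) _

theorem pvKeysSublist (g : String × List String → Option Int) :
    ∀ L : List (String × List String),
      ((L.filterMap (fun pr => (g pr).map (fun j => (pr.1, j)))).map (·.1)).Sublist
        (L.map (·.1)) := by
  intro L
  induction L with
  | nil => simp
  | cons pr rest ih =>
    cases hg : g pr with
    | none =>
      rw [List.filterMap_cons_none (by rw [hg]; rfl), List.map_cons]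
      exact ih.cons _
    | some j =>
      rw [List.filterMap_cons_some (by rw [hg]; rfl), List.map_cons, List.map_cons]
      exact ih.cons₂ _

theorem pvItemsOfList (l : List (String × Int)) (hnd : (l.map (·.1)).Nodup) :
    (PySem.Dict.ofList l).items = l := by
  show (l.foldl (fun acc p => acc.insert p.1 p.2) PySem.Dict.empty).items = l
  rw [PySem.Dict.items_foldl_insert_fresh l (fun p => p.1) (fun p => p.2) PySem.Dict.empty
        (fun a _ => PySem.Dict.contains_empty a.1) hnd]
  simp [PySem.Dict.empty]

-- ===== VERDICT (by name: the statement is the Claim_ definition above) =====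
theorem detect_availability_columns_spec : Claim_equal_detect_availability_columns := by
  intro headers _
  show detect_availability_columns headers = detect_availability_columns_alt headers
  have hnd : ((PySem.List.sorted
      (pvProgramTable.filterMap (fun pr =>
        (pvFirstIdxB pr.2 0 (headers.map (fun h => PySem.Chars.lower (PySem.Chars.strip h.toList)))).map
          (fun j => (pr.1, j))))
      (fun it => it.2)).map (·.1)).Nodup := by
    have hperm := PySem.List.sorted_perm
      (pvProgramTable.filterMap (fun pr =>
        (pvFirstIdxB pr.2 0 (headers.map (fun h => PySem.Chars.lower (PySem.Chars.strip h.toList)))).map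
          (fun j => (pr.1, j))))
      (fun it : String × Int => it.2) false
    exact ((hperm.map (·.1)).nodup_iff).mpr
      ((pvKeysSublist _ pvProgramTable).nodup pvTable_keys_nodup)
  have halt : detect_availability_columns_alt headers
      = PySem.List.sorted
          (pvProgramTable.filterMap (fun pr =>
            (pvFirstIdxB pr.2 0 (headers.map (fun h => PySem.Chars.lower (PySem.Chars.strip h.toList)))).map
              (fun j => (pr.1, j))))
          (fun it => it.2) := pvItemsOfList _ hnd
  rw [halt]
  show (detect_availability_columns headers) = _
  unfold detect_availability_columns
  rw [pvDetect_enum headers 0 PySem.Dict.empty,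
      pvAouter_items _ 0 PySem.Dict.empty]
  have hempty : pvProgramTable.filter
      (fun pr => !(PySem.Dict.empty : PySem.Dict String Int).contains pr.1)
      = pvProgramTable := by
    apply List.filter_eq_self.mpr
    intro pr _
    rw [PySem.Dict.contains_empty]
    rfl
  rw [hempty, pvBuild_sorted _ 0 pvProgramTable]
  rfl
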